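-- pv_equiv track=rewrite | github.com/tagoylo/AOC | 2024/D1/solution.py | measure_similarity
-- ===== SOURCE A (Python) =====
-- def measure_similarity(list1, list2):
--     similarity =[]
--     for item in list1:
--         count = list2.count(item)
--         if count == 0:
--             similarity.append(0)
--         else:
--             score = int(item) * count
--             similarity.append(int(score))
--     return sum(similarity)
-- ===== SOURCE B (Python) =====
-- def measure_similarity(list1, list2):
--     c1 = {}
--     for x in list1:
--         c1[x] = c1.get(x, 0) + 1
--     c2 = {}
--     for x in list2:
--         c2[x] = c2.get(x, 0) + 1
--     total = 0
--     for v, n in c1.items():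
--         total += n * int(v) * c2.get(v, 0)
--     return total
-- ===== Notes on version B (the rewrite author's own statement) =====
-- stated objective: faster
-- what changed: B builds frequency dictionaries for both lists once and sums n1*v*n2 over the distinct values of list1, instead of A's per-element loop that rescans list2 with list.count for every item.
import Mathlib
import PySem

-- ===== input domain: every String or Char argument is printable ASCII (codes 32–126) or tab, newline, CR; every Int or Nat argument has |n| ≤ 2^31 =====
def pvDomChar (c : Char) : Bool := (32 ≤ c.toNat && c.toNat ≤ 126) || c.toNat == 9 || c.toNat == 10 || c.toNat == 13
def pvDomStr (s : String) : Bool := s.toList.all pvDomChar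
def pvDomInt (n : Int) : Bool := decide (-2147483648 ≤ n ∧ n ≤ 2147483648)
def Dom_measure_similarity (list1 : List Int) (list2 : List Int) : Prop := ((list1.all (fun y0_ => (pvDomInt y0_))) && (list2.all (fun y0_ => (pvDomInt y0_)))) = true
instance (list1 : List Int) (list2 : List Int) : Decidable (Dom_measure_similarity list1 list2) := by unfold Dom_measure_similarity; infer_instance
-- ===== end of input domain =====

-- B replaces A's per-element rescan of list2 (list.count in a loop) by two frequency
-- dictionaries built once, summing n1*v*n2 over the distinct values of list1.

-- ===== PORT A =====
def measure_similarity (list1 : List Int) (list2 : List Int) : Int :=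
  let similarity : List Int :=
    list1.foldl (fun sim item =>
      let count := PySem.List.count list2 item
      if count = 0 then sim ++ [(0 : Int)]
      else sim ++ [item * (count : Int)]) []
  similarity.sum

-- ===== PORT B =====
def measure_similarity_alt (list1 : List Int) (list2 : List Int) : Int :=
  let c1 := list1.foldl (fun d x => d.insert x (d.getD x 0 + 1)) PySem.Dict.empty
  let c2 := list2.foldl (fun d x => d.insert x (d.getD x 0 + 1)) PySem.Dict.empty
  c1.items.foldl (fun total p => total + p.2 * p.1 * c2.getD p.1 0) 0

-- ===== PRECONDITION & SPEC =====
def Spec_measure_similarity (list1 : List Int) (list2 : List Int) (out : Int) : Prop := out = measure_similarity_alt list1 list2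
instance (list1 : List Int) (list2 : List Int) (out : Int) : Decidable (Spec_measure_similarity list1 list2 out) := by unfold Spec_measure_similarity; infer_instance

-- ===== CLAIM (what is proved, stated in full; the proofs are below) =====
def Claim_equal_measure_similarity : Prop := ∀ (list1 : List Int) (list2 : List Int), Dom_measure_similarity list1 list2 → Spec_measure_similarity list1 list2 (measure_similarity list1 list2)

-- ===== LEMMAS AND PROOFS =====

-- A 0/1-weighted sum over a list not containing x is 0.
lemma delta_sum_not_mem (f : Int → Int) (S : List Int) (x : Int) (hx : x ∉ S) :
    (S.map (fun v => (if v = x then (1 : Int) else 0) * f v)).sum = 0 := by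
  induction S with
  | nil => simp
  | cons y S ih =>
    simp only [List.mem_cons, not_or] at hx
    rw [List.map_cons, List.sum_cons, if_neg (Ne.symm hx.1), zero_mul, zero_add,
      ih hx.2]

-- A 0/1-weighted sum over a nodup list containing x picks out f x.
lemma delta_sum_mem (f : Int → Int) (S : List Int) (x : Int) (hnd : S.Nodup) (hx : x ∈ S) :
    (S.map (fun v => (if v = x then (1 : Int) else 0) * f v)).sum = f x := by
  induction S with
  | nil => simp at hx
  | cons y S ih =>
    rcases List.nodup_cons.mp hnd with ⟨hyS, hndS⟩
    rcases List.mem_cons.mp hx with h | h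
    · subst h
      rw [List.map_cons, List.sum_cons, if_pos rfl, one_mul,
        delta_sum_not_mem f S x hyS, add_zero]
    · have hyx : y ≠ x := fun e => hyS (e ▸ h)
      rw [List.map_cons, List.sum_cons, if_neg hyx, zero_mul, zero_add, ih hndS h]

-- ofList of a snoc is an 'add'.
lemma ofList_snoc (l : List Int) (x : Int) :
    PySem.Set.ofList (l ++ [x]) = (PySem.Set.ofList l).add x := by
  simp [PySem.Set.ofList, List.foldl_append]

-- Σ over a list = Σ over its distinct values weighted by multiplicity.
lemma sum_count_dedup (f : Int → Int) (l : List Int) :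
    ((PySem.Set.ofList l).map (fun v => (l.count v : Int) * f v)).sum = (l.map f).sum := by
  induction l using List.reverseRecOn with
  | nil => simp [PySem.Set.ofList]
  | append_singleton l x ih =>
    have hC : ∀ v : Int, ((l ++ [x]).count v : Int)
        = (l.count v : Int) + (if v = x then (1 : Int) else 0) := by
      intro v
      rw [List.count_append, List.count_singleton']
      by_cases h : v = x
      · subst h; simp
      · rw [if_neg (fun e => h e.symm), if_neg h]
        push_cast; ring
    have hmap : ((PySem.Set.ofList (l ++ [x])).map
          (fun v => ((l ++ [x]).count v : Int) * f v)).sum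
        = ((PySem.Set.ofList (l ++ [x])).map (fun v => (l.count v : Int) * f v)).sum
          + ((PySem.Set.ofList (l ++ [x])).map
              (fun v => (if v = x then (1 : Int) else 0) * f v)).sum := by
      rw [← PySem.List.sum_map_add_int]
      apply congrArg List.sum
      apply List.map_congr_left
      intro v _
      rw [hC v]; ring
    rw [hmap]
    have hdelta : ((PySem.Set.ofList (l ++ [x])).map
          (fun v => (if v = x then (1 : Int) else 0) * f v)).sum = f x :=
      delta_sum_mem f _ x (PySem.Set.nodup_ofList _)
        ((PySem.Set.mem_ofList _ _).mpr (by simp))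
    rw [hdelta, ofList_snoc]
    by_cases hx : x ∈ l
    · have hc : (PySem.Set.ofList l).contains x = true :=
        (PySem.Set.contains_iff _ _).mpr ((PySem.Set.mem_ofList _ _).mpr hx)
      have hadd : (PySem.Set.ofList l).add x = PySem.Set.ofList l := by
        simp only [PySem.Set.add]; rw [if_pos hc]
      rw [hadd, ih]
      simp
    · have hc : ¬ (PySem.Set.ofList l).contains x = true := by
        rw [PySem.Set.contains_iff, PySem.Set.mem_ofList]
        exact hx
      have hadd : (PySem.Set.ofList l).add x = PySem.Set.ofList l ++ [x] := by
        simp only [PySem.Set.add]; rw [if_neg hc]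
      rw [hadd, List.map_append, List.sum_append, ih]
      simp [List.count_eq_zero_of_not_mem hx]

-- A computes Σ_{x ∈ list1} x * (list2.count x).
lemma measure_similarity_eq_sum (list1 list2 : List Int) :
    measure_similarity list1 list2
      = (list1.map (fun x => x * (list2.count x : Int))).sum := by
  unfold measure_similarity
  have hfun : (fun (sim : List Int) (item : Int) =>
        let count := PySem.List.count list2 item
        if count = 0 then sim ++ [(0 : Int)] else sim ++ [item * (count : Int)])
      = fun sim item => sim ++ [item * (list2.count item : Int)] := by
    funext sim item
    simp only [PySem.List.count_eq]
    split_ifs with h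
    · simp [h]
    · rfl
  rw [hfun, PySem.List.foldl_append_singleton_eq_map]
  simp

-- B computes the same sum over distinct values, weighted by list1-counts.
lemma measure_similarity_alt_eq_sum (list1 list2 : List Int) :
    measure_similarity_alt list1 list2
      = ((PySem.Set.ofList list1).map
          (fun v => (list1.count v : Int) * (v * (list2.count v : Int)))).sum := by
  unfold measure_similarity_alt
  simp only [PySem.Dict.foldl_insert_getD_add_one_eq_counter,
    PySem.Dict.items_counter, PySem.Dict.getD_counter, PySem.List.foldl_add]
  rw [List.map_map, zero_add]
  apply congrArg List.sum
  apply List.map_congr_left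
  intro k _
  simp [mul_assoc]

-- ===== VERDICT (by name: the statement is the Claim_ definition above) =====
theorem measure_similarity_spec : Claim_equal_measure_similarity := by
  intro list1 list2 _
  unfold Spec_measure_similarity
  rw [measure_similarity_eq_sum, measure_similarity_alt_eq_sum,
    sum_count_dedup (fun x => x * (list2.count x : Int)) list1]
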